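-- pv_equiv track=rewrite | github.com/Chillbruhhh/MCPPortal | mcp_gateway/core/unified_transport.py | _infer_common_parameters
-- ===== SOURCE A (Python) =====
-- from typing import Any, Dict, List, Optional, Tuple, Union
--
-- def _infer_common_parameters(tool_name: str, description: str) -> Dict[str, Any]:
--     """Infer common parameters based on tool name and description."""
--     params = {}
--
--     # Common patterns for different tool types
--     if any(keyword in tool_name.lower() for keyword in ["search", "query", "find"]):
--         params["query"] = {
--             "type": "string",
--             "description": "Search query or terms"
--         }
--
--     if any(keyword in tool_name.lower() for keyword in ["read", "get", "fetch"]):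
--         params["path"] = {
--             "type": "string",
--             "description": "Path or identifier to read"
--         }
--         params["uri"] = {
--             "type": "string",
--             "description": "URI to fetch"
--         }
--
--     if any(keyword in tool_name.lower() for keyword in ["write", "create", "update"]):
--         params["content"] = {
--             "type": "string",
--             "description": "Content to write or update"
--         }
--
--     if any(keyword in tool_name.lower() for keyword in ["file", "path"]):
--         params["file_path"] = {
--             "type": "string",
--             "description": "File system path"
--         }
--
--     return params
-- ===== SOURCE B (Python) =====
-- _KEYWORDS = [
--     ("search", 0), ("query", 0), ("find", 0),
--     ("read", 1), ("get", 1), ("fetch", 1),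
--     ("write", 2), ("create", 2), ("update", 2),
--     ("file", 3), ("path", 3),
-- ]
--
-- _FIELDS = [
--     {"query": {"type": "string", "description": "Search query or terms"}},
--     {"path": {"type": "string", "description": "Path or identifier to read"},
--      "uri": {"type": "string", "description": "URI to fetch"}},
--     {"content": {"type": "string", "description": "Content to write or update"}},
--     {"file_path": {"type": "string", "description": "File system path"}},
-- ]
--
--
-- def _infer_common_parameters(tool_name: str, description: str) -> dict:
--     """Single left-to-right scan: at each position of the lowercased name, check
--     which keywords start there, collecting the matched rule indices; then emit
--     the fields of the matched rules in rule order."""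
--     lname = tool_name.lower()
--     matched = set()
--     for i in range(len(lname)):
--         for kw, r in _KEYWORDS:
--             if lname.startswith(kw, i):
--                 matched.add(r)
--     params = {}
--     for r, fields in enumerate(_FIELDS):
--         if r in matched:
--             params.update(fields)
--     return params
-- ===== Notes on version B (the rewrite author's own statement) =====
-- stated objective: alternative
-- what changed: Replaces A's four per-group any-substring-membership tests by a single left-to-right scan of the lowercased tool name that collects, at each position, the rule indices of the keywords starting there (manual multi-pattern matching into a matched-rule set), then emits the fields of matched rules from a table; description stays unused.
import Mathlib
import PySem

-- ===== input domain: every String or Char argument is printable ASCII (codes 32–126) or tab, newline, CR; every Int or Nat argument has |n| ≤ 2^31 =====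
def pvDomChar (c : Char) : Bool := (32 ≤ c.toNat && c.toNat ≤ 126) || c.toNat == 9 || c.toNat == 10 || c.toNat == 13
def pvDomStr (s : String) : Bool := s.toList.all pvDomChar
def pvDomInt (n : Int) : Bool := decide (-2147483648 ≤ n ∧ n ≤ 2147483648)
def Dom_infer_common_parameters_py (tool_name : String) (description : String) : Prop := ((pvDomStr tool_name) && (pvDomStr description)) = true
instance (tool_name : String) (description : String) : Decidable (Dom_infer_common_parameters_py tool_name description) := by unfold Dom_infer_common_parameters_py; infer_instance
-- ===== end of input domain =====

-- B replaces A's four any-substring-membership checks by a single left-to-right scan of the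
-- lowercased name that collects, per position, the rule indices of the keywords starting there
-- (objective: alternative; description stays unused; same return value).

-- ===== PORT A =====
-- literal transliteration of A: a dict built by four independent keyword membership checks, returned as its items list
def infer_common_parameters_py (tool_name : String) (description : String) : List (String × List (String × String)) :=
  let params : PySem.Dict String (List (String × String)) := PySem.Dict.empty
  let params := if (["search", "query", "find"].any (fun keyword => PySem.Str.isIn keyword (PySem.Str.lower tool_name))) then
      params.insert "query" [("type", "string"), ("description", "Search query or terms")]
    else params
  let params := if (["read", "get", "fetch"].any (fun keyword => PySem.Str.isIn keyword (PySem.Str.lower tool_name))) then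
      (params.insert "path" [("type", "string"), ("description", "Path or identifier to read")]).insert
        "uri" [("type", "string"), ("description", "URI to fetch")]
    else params
  let params := if (["write", "create", "update"].any (fun keyword => PySem.Str.isIn keyword (PySem.Str.lower tool_name))) then
      params.insert "content" [("type", "string"), ("description", "Content to write or update")]
    else params
  let params := if (["file", "path"].any (fun keyword => PySem.Str.isIn keyword (PySem.Str.lower tool_name))) then
      params.insert "file_path" [("type", "string"), ("description", "File system path")]
    else params
  params.items

-- ===== PORT B =====
-- _KEYWORDS of Source B: (keyword, rule index) pairs
def pvKeywords : List (List Char × Int) :=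
  [("search".toList, 0), ("query".toList, 0), ("find".toList, 0),
   ("read".toList, 1), ("get".toList, 1), ("fetch".toList, 1),
   ("write".toList, 2), ("create".toList, 2), ("update".toList, 2),
   ("file".toList, 3), ("path".toList, 3)]

-- _FIELDS of Source B: the fields each rule contributes
def pvFields : List (List (String × List (String × String))) :=
  [ [("query", [("type", "string"), ("description", "Search query or terms")])],
    [("path", [("type", "string"), ("description", "Path or identifier to read")]),
     ("uri", [("type", "string"), ("description", "URI to fetch")])],
    [("content", [("type", "string"), ("description", "Content to write or update")])],
    [("file_path", [("type", "string"), ("description", "File system path")])] ]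

-- the scanning loop of Source B: for i in range(len(lname)): for kw, r in _KEYWORDS:
--   if lname.startswith(kw, i): matched.add(r)
-- (exact: lname.startswith(kw, i) with 0 ≤ i is kw.isPrefixOf (lname.drop i))
def pvScan (lname : List Char) : PySem.Set Int :=
  (List.range lname.length).foldl
    (fun matched i =>
      pvKeywords.foldl
        (fun matched kr => if kr.1.isPrefixOf (lname.drop i) then matched.add kr.2 else matched)
        matched)
    PySem.Set.empty

def infer_common_parameters_py_alt (tool_name : String) (description : String) : List (String × List (String × String)) :=
  let lname := PySem.Chars.lower tool_name.toList
  let matched := pvScan lname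
  ((PySem.List.enumerate pvFields).foldl
      (fun params rf =>
        if matched.contains rf.1 then rf.2.foldl (fun d p => d.insert p.1 p.2) params
        else params)
      PySem.Dict.empty).items

-- ===== PRECONDITION & SPEC =====
def Spec_infer_common_parameters_py (tool_name : String) (description : String) (out : List (String × List (String × String))) : Prop := out = infer_common_parameters_py_alt tool_name description
instance (tool_name : String) (description : String) (out : List (String × List (String × String))) : Decidable (Spec_infer_common_parameters_py tool_name description out) := by unfold Spec_infer_common_parameters_py; infer_instance

-- ===== CLAIM =====
def Claim_equal_infer_common_parameters_py : Prop := ∀ (tool_name : String) (description : String), Dom_infer_common_parameters_py tool_name description → Spec_infer_common_parameters_py tool_name description (infer_common_parameters_py tool_name description)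

-- ===== LEMMAS AND PROOFS =====

-- the inner loop only adds rule indices; membership afterwards = membership before, or some triggering keyword pair
lemma mem_inner_fold (ks : List (List Char × Int)) (c : List Char → Bool) (m : PySem.Set Int) (r : Int) :
    r ∈ ks.foldl (fun m kr => if c kr.1 then m.add kr.2 else m) m ↔
      r ∈ m ∨ ∃ kr ∈ ks, c kr.1 = true ∧ kr.2 = r := by
  induction ks generalizing m with
  | nil => simp
  | cons k ks ih =>
    by_cases h : c k.1 = true <;>
      simp [List.foldl_cons, h, ih, PySem.Set.mem_add] <;> tauto

-- the outer loop over positions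
lemma mem_outer_fold (I : List Nat) (lname : List Char) (m : PySem.Set Int) (r : Int) :
    r ∈ I.foldl
        (fun m i => pvKeywords.foldl
          (fun m kr => if kr.1.isPrefixOf (lname.drop i) then m.add kr.2 else m) m) m ↔
      r ∈ m ∨ ∃ i ∈ I, ∃ kr ∈ pvKeywords, kr.1.isPrefixOf (lname.drop i) = true ∧ kr.2 = r := by
  induction I generalizing m with
  | nil => simp
  | cons i I ih =>
    rw [List.foldl_cons, ih, mem_inner_fold pvKeywords (fun kw => kw.isPrefixOf (lname.drop i))]
    simp only [List.mem_cons, exists_eq_or_imp]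
    exact or_assoc

-- a nonempty keyword starts at some scanned position iff it is a substring
lemma bounded_prefix_iff (sub lname : List Char) (h : sub ≠ []) :
    (∃ i < lname.length, sub <+: lname.drop i) ↔ sub <:+: lname := by
  rw [← PySem.Chars.isIn_iff_infix, ← PySem.Chars.exists_prefix_drop_iff_isIn]
  constructor
  · rintro ⟨i, -, hp⟩; exact ⟨i, hp⟩
  · rintro ⟨j, hp⟩
    refine ⟨j, ?_, hp⟩
    by_contra hj
    rw [List.drop_eq_nil_of_le (by omega)] at hp
    exact h (List.prefix_nil.mp hp)

-- membership in the scan result, per rule index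
lemma contains_pvScan (lname : List Char) (r : Int) :
    (pvScan lname).contains r = true ↔
      ∃ i ∈ List.range lname.length, ∃ kr ∈ pvKeywords, kr.1.isPrefixOf (lname.drop i) = true ∧ kr.2 = r := by
  unfold pvScan
  rw [PySem.Set.contains, List.contains_iff_mem, mem_outer_fold]
  simp [PySem.Set.empty]


lemma contains_scan_0 (t : String) :
    (pvScan (PySem.Chars.lower t.toList)).contains (0:Int) =
      (["search", "query", "find"].any (fun keyword => PySem.Str.isIn keyword (PySem.Str.lower t))) := by
  rw [Bool.eq_iff_iff, contains_pvScan]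
  simp only [pvKeywords, List.mem_cons, List.not_mem_nil, exists_eq_or_imp]
  simp only [List.any_cons, List.any_nil, Bool.or_eq_true, PySem.Str.isIn_iff_infix,
    PySem.Str.toList_lower]
  norm_num
  simp only [and_or_left, exists_or]
  rw [bounded_prefix_iff _ _ (by decide), bounded_prefix_iff _ _ (by decide), bounded_prefix_iff _ _ (by decide)]

lemma contains_scan_1 (t : String) :
    (pvScan (PySem.Chars.lower t.toList)).contains (1:Int) =
      (["read", "get", "fetch"].any (fun keyword => PySem.Str.isIn keyword (PySem.Str.lower t))) := by
  rw [Bool.eq_iff_iff, contains_pvScan]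
  simp only [pvKeywords, List.mem_cons, List.not_mem_nil, exists_eq_or_imp]
  simp only [List.any_cons, List.any_nil, Bool.or_eq_true, PySem.Str.isIn_iff_infix,
    PySem.Str.toList_lower]
  norm_num
  simp only [and_or_left, exists_or]
  rw [bounded_prefix_iff _ _ (by decide), bounded_prefix_iff _ _ (by decide), bounded_prefix_iff _ _ (by decide)]

lemma contains_scan_2 (t : String) :
    (pvScan (PySem.Chars.lower t.toList)).contains (2:Int) =
      (["write", "create", "update"].any (fun keyword => PySem.Str.isIn keyword (PySem.Str.lower t))) := by
  rw [Bool.eq_iff_iff, contains_pvScan]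
  simp only [pvKeywords, List.mem_cons, List.not_mem_nil, exists_eq_or_imp]
  simp only [List.any_cons, List.any_nil, Bool.or_eq_true, PySem.Str.isIn_iff_infix,
    PySem.Str.toList_lower]
  norm_num
  simp only [and_or_left, exists_or]
  rw [bounded_prefix_iff _ _ (by decide), bounded_prefix_iff _ _ (by decide), bounded_prefix_iff _ _ (by decide)]

lemma contains_scan_3 (t : String) :
    (pvScan (PySem.Chars.lower t.toList)).contains (3:Int) =
      (["file", "path"].any (fun keyword => PySem.Str.isIn keyword (PySem.Str.lower t))) := by
  rw [Bool.eq_iff_iff, contains_pvScan]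
  simp only [pvKeywords, List.mem_cons, List.not_mem_nil, exists_eq_or_imp]
  simp only [List.any_cons, List.any_nil, Bool.or_eq_true, PySem.Str.isIn_iff_infix,
    PySem.Str.toList_lower]
  norm_num
  simp only [and_or_left, exists_or]
  rw [bounded_prefix_iff _ _ (by decide), bounded_prefix_iff _ _ (by decide)]

-- enumerate(_FIELDS) as a literal
lemma enumerate_pvFields :
    PySem.List.enumerate pvFields =
      [((0:Int), pvFields[0]), (1, pvFields[1]), (2, pvFields[2]), (3, pvFields[3])] := by
  rfl

-- ===== VERDICT =====
theorem infer_common_parameters_py_spec : Claim_equal_infer_common_parameters_py := by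
  intro tool_name description _
  unfold Spec_infer_common_parameters_py infer_common_parameters_py infer_common_parameters_py_alt
  simp only [enumerate_pvFields, List.foldl_cons, List.foldl_nil]
  rw [contains_scan_0, contains_scan_1, contains_scan_2, contains_scan_3]
  split_ifs <;> rfl
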